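-- pv_equiv track=rewrite | github.com/jotreee/Algorithm | 백준/Gold/16637. 괄호 추가하기/괄호 추가하기.py | result
-- ===== SOURCE A (Python) =====
-- def result(li1):
--     number = int(li1[0])
--
--     for i in range(1, len(li1) - 1, 2):
--         if li1[i] == '+':
--             number += int(li1[i + 1])
--         elif li1[i] == '-':
--             number -= int(li1[i + 1])
--         else:
--             number *= int(li1[i + 1])
--
--     return number
-- ===== SOURCE B (Python) =====
-- def result(li1):
--     # One flat scan over the tokens with a parity state machine: remember the
--     # pending operator at odd positions, apply it to the next operand at even
--     # positions.  (A instead jumps through indices two at a time.)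
--     acc, op = 0, ''
--     for i, tok in enumerate(li1):
--         if i == 0:
--             acc = int(tok)
--         elif i % 2 == 1:
--             op = tok
--         elif op == '+':
--             acc += int(tok)
--         elif op == '-':
--             acc -= int(tok)
--         else:
--             acc *= int(tok)
--     return acc
-- ===== Notes on version B (the rewrite author's own statement) =====
-- stated objective: alternative
-- what changed: Replaces A's index loop over range(1, len-1, 2) with a single flat enumerate scan that carries the pending operator as state and applies it at each even position.
import Mathlib
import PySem

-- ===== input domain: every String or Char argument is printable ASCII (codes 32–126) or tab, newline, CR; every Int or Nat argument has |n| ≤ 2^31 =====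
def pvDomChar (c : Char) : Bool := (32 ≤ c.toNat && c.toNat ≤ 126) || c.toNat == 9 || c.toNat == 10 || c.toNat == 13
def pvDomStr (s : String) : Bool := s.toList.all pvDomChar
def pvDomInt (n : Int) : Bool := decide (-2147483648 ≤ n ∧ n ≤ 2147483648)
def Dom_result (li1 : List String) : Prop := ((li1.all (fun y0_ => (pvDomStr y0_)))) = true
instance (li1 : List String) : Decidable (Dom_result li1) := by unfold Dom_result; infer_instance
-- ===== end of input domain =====

-- B changes the traversal: a flat enumerate scan carrying the pending operator as state,
-- instead of A's index loop that jumps two at a time; equal cost, proved equal on Pre_.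

-- ===== PORT A =====
-- A's loop body (li1[i] dispatch, consuming li1[i+1]); Int '%'/indices via PySem
def stepA (li1 : List String) (number : Int) (i : Int) : Int :=
  if PySem.List.pyGetD li1 i "" = "+" then
    number + (PySem.Int.ofStr? (PySem.List.pyGetD li1 (i + 1) "")).getD 0
  else if PySem.List.pyGetD li1 i "" = "-" then
    number - (PySem.Int.ofStr? (PySem.List.pyGetD li1 (i + 1) "")).getD 0
  else
    number * (PySem.Int.ofStr? (PySem.List.pyGetD li1 (i + 1) "")).getD 0

def result (li1 : List String) : Int :=
  (PySem.List.pyRange 1 ((li1.length : Int) - 1) 2).foldl (stepA li1)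
    ((PySem.Int.ofStr? (PySem.List.pyGetD li1 0 "")).getD 0)

-- ===== PORT B =====
-- B's loop body over (index, token); '%' on a positive divisor coincides with Python's
def stepB (st : Int × String) (p : Int × String) : Int × String :=
  if p.1 = 0 then ((PySem.Int.ofStr? p.2).getD 0, st.2)
  else if p.1 % 2 = 1 then (st.1, p.2)
  else if st.2 = "+" then (st.1 + (PySem.Int.ofStr? p.2).getD 0, st.2)
  else if st.2 = "-" then (st.1 - (PySem.Int.ofStr? p.2).getD 0, st.2)
  else (st.1 * (PySem.Int.ofStr? p.2).getD 0, st.2)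

def result_alt (li1 : List String) : Int :=
  ((PySem.List.enumerate li1).foldl stepB (0, "")).1

-- ===== PRECONDITION & SPEC =====
-- Pre_ excludes exactly the inputs where the Python A raises: the empty list (li1[0])
-- and inputs whose int() calls fail, i.e. some even-index token does not parse as an int.
def Pre_result (li1 : List String) : Prop :=
  li1 ≠ [] ∧ ∀ i ∈ List.range li1.length, i % 2 = 0 →
    (PySem.Int.ofStr? (li1.getD i "")).isSome = true
instance (li1 : List String) : Decidable (Pre_result li1) := by unfold Pre_result; infer_instance
def pvWitness_result : List String := ["3", "+", "5", "*", "-2"]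

def Spec_result (li1 : List String) (out : Int) : Prop := out = result_alt li1
instance (li1 : List String) (out : Int) : Decidable (Spec_result li1 out) := by unfold Spec_result; infer_instance

-- ===== CLAIM (what is proved, stated in full; the proofs are below) =====
def Claim_equal_result : Prop := ∀ (li1 : List String), Dom_result li1 → Pre_result li1 → Spec_result li1 (result li1)

-- ===== LEMMAS AND PROOFS =====

-- common spine: consume (operator, operand) pairs two at a time
def go (acc : Int) : List String → Int
  | op :: v :: rest =>
      go (if op = "+" then acc + (PySem.Int.ofStr? v).getD 0
          else if op = "-" then acc - (PySem.Int.ofStr? v).getD 0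
          else acc * (PySem.Int.ofStr? v).getD 0) rest
  | _ => acc

lemma go_short (acc : Int) (rest : List String) (h : rest.length ≤ 1) : go acc rest = acc := by
  match rest, h with
  | [], _ => rfl
  | [x], _ => rfl

lemma pyRange_two_nil (a b : Int) (h : b ≤ a) : PySem.List.pyRange a b 2 = [] := by
  rw [PySem.List.pyRange_of_pos a b (by norm_num)]
  simp [show ¬ a < b by omega]

lemma pyRange_two_cons (a b : Int) (h : a < b) :
    PySem.List.pyRange a b 2 = a :: PySem.List.pyRange (a + 2) b 2 := by
  rw [PySem.List.pyRange_of_pos a b (by norm_num),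
      PySem.List.pyRange_of_pos (a + 2) b (by norm_num)]
  by_cases h2 : a + 2 < b
  · have hc : ((b - a + 2 - 1) / 2).toNat = ((b - (a + 2) + 2 - 1) / 2).toNat + 1 := by omega
    simp only [if_pos h, if_pos h2, hc, List.range_succ_eq_map, List.map_cons, List.map_map]
    congr 1
    · push_cast; ring
    · apply List.map_congr_left; intro k _; simp only [Function.comp_apply]; push_cast; ring
  · have hc : ((b - a + 2 - 1) / 2).toNat = 1 := by omega
    simp [if_pos h, if_neg h2, hc, List.range_succ]

lemma A_key (li1 : List String) :
    ∀ (m j : Nat) (acc : Int), li1.length ≤ m + (j + 1) →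
      (PySem.List.pyRange ((j : Int) + 1) ((li1.length : Int) - 1) 2).foldl (stepA li1) acc
        = go acc (li1.drop (j + 1)) := by
  intro m
  induction m with
  | zero =>
      intro j acc h
      rw [pyRange_two_nil _ _ (by omega), List.foldl_nil,
          go_short acc _ (by simp; omega)]
  | succ m ih =>
      intro j acc h
      by_cases hb : j + 2 < li1.length
      · have h1 : j + 1 < li1.length := by omega
        rw [pyRange_two_cons _ _ (by omega), List.foldl_cons]
        have hr : ((j : Int) + 1) + 2 = ((j + 2 : Nat) : Int) + 1 := by push_cast; ring
        rw [hr, ih (j + 2) _ (by omega)]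
        have hd1 : li1.drop (j + 1) = li1[j + 1] :: li1.drop (j + 2) :=
          List.drop_eq_getElem_cons h1
        have hd2 : li1.drop (j + 2) = li1[j + 2] :: li1.drop (j + 3) :=
          List.drop_eq_getElem_cons hb
        rw [hd1, hd2, go]
        have hi1 : ((j : Int) + 1) = ((j + 1 : Nat) : Int) := by push_cast; ring
        have hi2 : ((j + 1 : Nat) : Int) + 1 = ((j + 2 : Nat) : Int) := by push_cast; ring
        have h3 : j + 2 + 1 = j + 3 := by omega
        simp only [stepA, hi1, hi2, h3, PySem.List.pyGetD_natCast,
          List.getD_eq_getElem?_getD, List.getElem?_eq_getElem h1,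
          List.getElem?_eq_getElem hb, Option.getD_some]
      · rw [pyRange_two_nil _ _ (by omega), List.foldl_nil,
            go_short acc _ (by simp; omega)]

lemma B_key :
    ∀ (n : Nat) (rest : List String), rest.length ≤ n → ∀ (j : Nat) (acc : Int) (op : String),
      ((PySem.List.enumerate rest (2 * (j : Int) + 1)).foldl stepB (acc, op)).1 = go acc rest := by
  intro n
  induction n with
  | zero =>
      intro rest h j acc op
      have : rest = [] := List.eq_nil_of_length_eq_zero (by omega)
      subst this; simp [PySem.List.enumerate_nil, go]
  | succ n ih =>
      intro rest h j acc op
      match rest, h with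
      | [], _ => simp [PySem.List.enumerate_nil, go]
      | [x], _ =>
          rw [PySem.List.enumerate_cons, List.foldl_cons]
          have hx : stepB (acc, op) (2 * (j : Int) + 1, x) = (acc, x) := by
            simp only [stepB]
            rw [if_neg (by omega), if_pos (by omega)]
          rw [hx]; simp [PySem.List.enumerate_nil, go]
      | x :: y :: t', h =>
          rw [PySem.List.enumerate_cons, List.foldl_cons]
          have hx : stepB (acc, op) (2 * (j : Int) + 1, x) = (acc, x) := by
            simp only [stepB]
            rw [if_neg (by omega), if_pos (by omega)]
          rw [hx, PySem.List.enumerate_cons, List.foldl_cons]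
          have hy : stepB (acc, x) (2 * (j : Int) + 1 + 1, y) =
              ((if x = "+" then acc + (PySem.Int.ofStr? y).getD 0
                else if x = "-" then acc - (PySem.Int.ofStr? y).getD 0
                else acc * (PySem.Int.ofStr? y).getD 0), x) := by
            simp only [stepB]
            rw [if_neg (by omega), if_neg (by omega)]
            split_ifs <;> rfl
          rw [hy]
          have hs : 2 * (j : Int) + 1 + 1 + 1 = 2 * ((j + 1 : Nat) : Int) + 1 := by
            push_cast; ring
          rw [hs, go]
          have ht' : t'.length ≤ n := by simp at h; omega
          exact ih t' ht' (j + 1) _ _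

lemma main_eq (li1 : List String) : result li1 = result_alt li1 := by
  cases li1 with
  | nil => decide
  | cons x t =>
      unfold result result_alt
      rw [PySem.List.enumerate_cons, List.foldl_cons]
      have h0 : stepB (0, "") (0, x) = ((PySem.Int.ofStr? x).getD 0, "") := by
        simp [stepB]
      rw [h0]
      have hB := B_key t.length t (le_refl _) 0 ((PySem.Int.ofStr? x).getD 0) ""
      norm_num at hB
      have hA := A_key (x :: t) (x :: t).length 0
        ((PySem.Int.ofStr? (PySem.List.pyGetD (x :: t) 0 "")).getD 0) (by omega)
      norm_num at hA
      have hl : (((x :: t).length : Int)) - 1 = (t.length : Int) := by simp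
      rw [PySem.List.pyGetD_zero_cons, hl, hA]
      norm_num
      rw [hB]

-- ===== VERDICT (by name: the statement is the Claim_ definition above) =====
theorem result_spec : Claim_equal_result := by
  intro li1 _ _
  unfold Spec_result
  exact main_eq li1
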